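-- pv_equiv track=rewrite | github.com/SummaryRex/TubesDataCoklatAKA | UI.py | recursive_search
-- ===== SOURCE A (Python) =====
-- def recursive_search(data, score, index=0, result=None):
--     if result is None:
--         result = []
--     if index >= len(data):
--         return None if len(result) == 0 else result
--     if data[index]['skor'] == score:
--         result.append(data[index])
--     return recursive_search(data, score, index + 1, result)
-- ===== SOURCE B (Python) =====
-- def recursive_search(data, score, index=0, result=None):
--     if result is None:
--         result = []
--     for i in range(index, len(data)):
--         if data[i]['skor'] == score:
--             result.append(data[i])
--     return None if len(result) == 0 else result
-- ===== Notes on version B (the rewrite author's own statement) =====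
-- stated objective: simpler
-- what changed: Replaced the tail recursion with one optional-index accumulator call per element by a single explicit for-loop over range(index, len(data)), keeping the parameters, the in-place append to a caller-supplied result list and the empty->None return.
import Mathlib
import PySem

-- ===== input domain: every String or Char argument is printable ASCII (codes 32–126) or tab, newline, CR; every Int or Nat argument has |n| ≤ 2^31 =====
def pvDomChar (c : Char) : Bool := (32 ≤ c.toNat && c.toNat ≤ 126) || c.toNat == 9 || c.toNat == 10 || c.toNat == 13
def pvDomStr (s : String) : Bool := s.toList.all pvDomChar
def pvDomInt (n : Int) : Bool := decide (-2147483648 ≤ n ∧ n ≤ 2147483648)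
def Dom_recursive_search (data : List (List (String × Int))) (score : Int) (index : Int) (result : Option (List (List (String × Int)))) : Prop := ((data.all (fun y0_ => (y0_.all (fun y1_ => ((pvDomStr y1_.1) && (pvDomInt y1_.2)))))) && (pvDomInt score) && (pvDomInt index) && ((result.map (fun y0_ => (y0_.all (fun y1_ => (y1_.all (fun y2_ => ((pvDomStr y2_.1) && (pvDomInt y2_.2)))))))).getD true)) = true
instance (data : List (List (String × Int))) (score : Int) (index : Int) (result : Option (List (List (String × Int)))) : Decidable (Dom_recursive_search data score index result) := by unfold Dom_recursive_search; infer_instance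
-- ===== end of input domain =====

-- B replaces A's tail recursion by one explicit for-loop over range(index, len(data)) (simpler, same cost);
-- the Python B performs the same in-place append mutation of a caller-supplied result list as A.

-- ===== PORT A =====
-- dict lookup row['skor'] (first match in the association list; none = KeyError, excluded by Pre_)
def pvSkor (row : List (String × Int)) : Option Int :=
  (row.find? (fun p => p.1 == "skor")).map (·.2)

def pvGoA (data : List (List (String × Int))) (score : Int) (index : Int)
    (result : List (List (String × Int))) : Option (List (List (String × Int))) :=
  if h : (data.length : Int) ≤ index then
    (if result.length = 0 then none else some result)
  else
    match PySem.List.pyGet? data index with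
    | none => none   -- IndexError in Python; excluded by Pre_
    | some row =>
      pvGoA data score (index + 1) (if pvSkor row = some score then result ++ [row] else result)
termination_by ((data.length : Int) - index).toNat
decreasing_by omega

def recursive_search (data : List (List (String × Int))) (score : Int) (index : Int) (result : Option (List (List (String × Int)))) : Option (List (List (String × Int))) :=
  pvGoA data score index (result.getD [])

-- ===== PORT B =====
def recursive_search_alt (data : List (List (String × Int))) (score : Int) (index : Int) (result : Option (List (List (String × Int)))) : Option (List (List (String × Int))) :=
  let res := (PySem.List.pyRange index (data.length : Int) 1).foldl
    (fun acc i =>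
      match PySem.List.pyGet? data i with
      | none => acc   -- IndexError in Python; excluded by Pre_
      | some row => if pvSkor row = some score then acc ++ [row] else acc)
    (result.getD [])
  if res.length = 0 then none else some res

-- ===== PRECONDITION & SPEC =====
-- Pre_ excludes exactly the inputs on which A raises: IndexError when index < -len(data),
-- and KeyError when some accessed row (data[max(index,0):] for nonneg index, all of data for negative index) lacks the key 'skor'.
def Pre_recursive_search (data : List (List (String × Int))) (score : Int) (index : Int) (result : Option (List (List (String × Int)))) : Prop :=
  -(data.length : Int) ≤ index ∧ ∀ row ∈ data.drop index.toNat, (row.find? (fun p => p.1 == "skor")).isSome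
instance (data : List (List (String × Int))) (score : Int) (index : Int) (result : Option (List (List (String × Int)))) : Decidable (Pre_recursive_search data score index result) := by unfold Pre_recursive_search; infer_instance

def pvWitness_recursive_search : (List (List (String × Int))) × Int × Int × (Option (List (List (String × Int)))) :=
  ([[("skor", 3)], [("skor", 5)]], 3, 0, none)

def Spec_recursive_search (data : List (List (String × Int))) (score : Int) (index : Int) (result : Option (List (List (String × Int)))) (out : Option (List (List (String × Int)))) : Prop := out = recursive_search_alt data score index result
instance (data : List (List (String × Int))) (score : Int) (index : Int) (result : Option (List (List (String × Int)))) (out : Option (List (List (String × Int)))) : Decidable (Spec_recursive_search data score index result out) := by unfold Spec_recursive_search; infer_instance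

-- ===== CLAIM (what is proved, stated in full; the proofs are below) =====
def Claim_equal_recursive_search : Prop := ∀ (data : List (List (String × Int))) (score : Int) (index : Int) (result : Option (List (List (String × Int)))), Dom_recursive_search data score index result → Pre_recursive_search data score index result → Spec_recursive_search data score index result (recursive_search data score index result)

-- ===== LEMMAS AND PROOFS =====

-- A's recursion at position `index` equals B's fold over range(index, len(data)), for any accumulator,
-- as long as every index from `index` on is in range (i.e. -len ≤ index).
theorem pvGoA_eq_fold (data : List (List (String × Int))) (score : Int) :
    ∀ (index : Int) (acc : List (List (String × Int))),
      -(data.length : Int) ≤ index →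
      pvGoA data score index acc =
        (let res := (PySem.List.pyRange index (data.length : Int) 1).foldl
          (fun acc i =>
            match PySem.List.pyGet? data i with
            | none => acc
            | some row => if pvSkor row = some score then acc ++ [row] else acc) acc
         if res.length = 0 then none else some res) := by
  intro index acc hge
  induction index, acc using pvGoA.induct data score with
  | case1 index acc h _ =>
    rw [pvGoA]
    simp only [dif_pos h]
    rw [PySem.List.pyRange_one_eq_nil h]
    simp_all
  | case2 index acc h _ =>
    rw [pvGoA]
    simp only [dif_pos h]
    rw [PySem.List.pyRange_one_eq_nil h]
    simp_all
  | case3 index acc h hnone =>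
    exfalso
    rw [PySem.List.pyGet?_eq_none_iff] at hnone
    exact hnone ⟨hge, by omega⟩
  | case4 index acc h row hrow ih =>
    rw [pvGoA]
    simp only [dif_neg h, hrow]
    rw [PySem.List.pyRange_one_cons (by omega), List.foldl_cons, hrow]
    exact ih (by omega)

-- ===== VERDICT (by name: the statement is the Claim_ definition above) =====
theorem recursive_search_spec : Claim_equal_recursive_search := by
  intro data score index result _hdom hpre
  unfold Spec_recursive_search recursive_search recursive_search_alt
  exact pvGoA_eq_fold data score index (result.getD []) hpre.1
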